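-- pv_equiv track=rewrite | github.com/akash22gupta/Algorithms_HackerRank | Implementation/breaking_the_records/breaking_the_records.py | breakingRecords
-- ===== SOURCE A (Python) =====
-- def breakingRecords(scores):
--     #
--     # Write your code here.
--     #
--     l = scores[0]
--     lcount = 0
--     hcount = 0
--     h = scores[0]
--     for score in scores:
--         if score > h:
--             hcount += 1
--             h = score
--         if score < l:
--             lcount += 1
--             l = score
--     return(hcount,lcount)
-- ===== SOURCE B (Python) =====
-- def breakingRecords(scores):
--     # running-prefix-extrema decomposition: build the running max/min lists,
--     # then count the adjacent positions where they strictly change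
--     runmax = [scores[0]]
--     for s in scores[1:]:
--         runmax.append(max(runmax[-1], s))
--     runmin = [scores[0]]
--     for s in scores[1:]:
--         runmin.append(min(runmin[-1], s))
--     hcount = sum(1 for a, b in zip(runmax, runmax[1:]) if b > a)
--     lcount = sum(1 for a, b in zip(runmin, runmin[1:]) if b < a)
--     return (hcount, lcount)
-- ===== Notes on version B (the rewrite author's own statement) =====
-- stated objective: alternative
-- what changed: Replaces A's single stateful loop with four running counters by a data-flow decomposition: materialize the running-maximum and running-minimum prefix lists, then count adjacent strict changes in each.
import Mathlib
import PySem

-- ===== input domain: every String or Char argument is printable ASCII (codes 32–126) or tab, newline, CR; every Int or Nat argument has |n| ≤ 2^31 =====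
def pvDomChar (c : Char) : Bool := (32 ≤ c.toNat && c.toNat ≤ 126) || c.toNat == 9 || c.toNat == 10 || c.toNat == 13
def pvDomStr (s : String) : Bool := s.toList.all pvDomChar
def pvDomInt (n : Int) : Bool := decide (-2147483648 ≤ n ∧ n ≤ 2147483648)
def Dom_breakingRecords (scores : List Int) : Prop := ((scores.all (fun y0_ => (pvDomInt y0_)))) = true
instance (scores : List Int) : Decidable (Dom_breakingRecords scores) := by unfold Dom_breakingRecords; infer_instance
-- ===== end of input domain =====

-- B replaces A's single stateful loop by building running-max/min prefix lists and counting
-- adjacent strict changes (alternative decomposition, same O(n) cost); both raise on [] (Pre_).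


-- ===== PORT A =====
-- A's loop: state (l, lcount, hcount, h), branches in source order.
def brLoopA (xs : List Int) (l lcount hcount h : Int) : Int × Int :=
  match xs with
  | [] => (hcount, lcount)
  | x :: rest =>
    let hp : Int × Int := if x > h then (hcount + 1, x) else (hcount, h)
    let lp : Int × Int := if x < l then (lcount + 1, x) else (lcount, l)
    brLoopA rest lp.2 lp.1 hp.1 hp.2

def breakingRecords (scores : List Int) : Int × Int :=
  match scores with
  | [] => (0, 0)   -- Python raises IndexError on scores[0]; excluded by Pre_
  | s0 :: _ => brLoopA scores s0 0 0 s0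

-- ===== PORT B =====
-- running-prefix list: [acc] then append f(last, s) for each remaining element
def runScan (f : Int → Int → Int) (acc : Int) : List Int → List Int
  | [] => [acc]
  | x :: xs => acc :: runScan f (f acc x) xs

-- sum(1 for a,b in zip(run, run[1:]) if p a b)
def countAdj (p : Int → Int → Bool) : List Int → Int
  | a :: b :: rest => (if p a b then 1 else 0) + countAdj p (b :: rest)
  | _ => 0

def breakingRecords_alt (scores : List Int) : Int × Int :=
  match scores with
  | [] => (0, 0)   -- Python raises IndexError on scores[0]; excluded by Pre_
  | s0 :: rest =>
    let runmax := runScan (fun a b => max a b) s0 rest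
    let runmin := runScan (fun a b => min a b) s0 rest
    (countAdj (fun a b => b > a) runmax, countAdj (fun a b => b < a) runmin)

-- ===== PRECONDITION & SPEC =====
-- A raises IndexError on the empty list (scores[0]); Pre_ excludes exactly that input.
def Pre_breakingRecords (scores : List Int) : Prop := scores ≠ []
instance (scores : List Int) : Decidable (Pre_breakingRecords scores) := by unfold Pre_breakingRecords; infer_instance
def pvWitness_breakingRecords : List Int := [3, 1, 4]

def Spec_breakingRecords (scores : List Int) (out : Int × Int) : Prop := out = breakingRecords_alt scores
instance (scores : List Int) (out : Int × Int) : Decidable (Spec_breakingRecords scores out) := by unfold Spec_breakingRecords; infer_instance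

-- ===== CLAIM (what is proved, stated in full; the proofs are below) =====
def Claim_equal_breakingRecords : Prop := ∀ (scores : List Int), Dom_breakingRecords scores → Pre_breakingRecords scores → Spec_breakingRecords scores (breakingRecords scores)

-- ===== LEMMAS AND PROOFS =====
theorem runScan_head (f : Int → Int → Int) (acc : Int) (xs : List Int) :
    ∃ t, runScan f acc xs = acc :: t := by
  cases xs <;> exact ⟨_, rfl⟩

-- loop invariant: A's state fold equals initial counters plus adjacent-change counts of the scans
theorem brLoopA_eq_counts (xs : List Int) : ∀ (l lcount hcount h : Int),
    brLoopA xs l lcount hcount h =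
      (hcount + countAdj (fun a b => b > a) (runScan (fun a b => max a b) h xs),
       lcount + countAdj (fun a b => b < a) (runScan (fun a b => min a b) l xs)) := by
  induction xs with
  | nil => intro l lc hc h; simp [brLoopA, runScan, countAdj]
  | cons x rest ih =>
    intro l lc hc h
    obtain ⟨tM, hM⟩ := runScan_head (fun a b => max a b) (max h x) rest
    obtain ⟨tm, hm⟩ := runScan_head (fun a b => min a b) (min l x) rest
    have hmax : (if x > h then x else h) = max h x := by
      split <;> omega
    have hmin : (if x < l then x else l) = min l x := by
      split <;> omega
    show brLoopA (x :: rest) l lc hc h = _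
    rw [show runScan (fun a b => max a b) h (x :: rest)
          = h :: runScan (fun a b => max a b) (max h x) rest from rfl,
        show runScan (fun a b => min a b) l (x :: rest)
          = l :: runScan (fun a b => min a b) (min l x) rest from rfl,
        hM, hm]
    simp only [brLoopA, countAdj, ← hM, ← hm]
    rw [ih]
    by_cases hxh : x > h <;> by_cases hxl : x < l <;>
      simp [hxh, hxl, show max h x = if x > h then x else h from hmax.symm,
            show min l x = if x < l then x else l from hmin.symm]
    all_goals first | exact ⟨by ring, by ring⟩ | ring

-- ===== VERDICT (by name: the statement is the Claim_ definition above) =====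
theorem breakingRecords_spec : Claim_equal_breakingRecords := by
  intro scores _ hpre
  unfold Spec_breakingRecords
  match scores with
  | [] => exact absurd rfl hpre
  | s0 :: rest =>
    show brLoopA (s0 :: rest) s0 0 0 s0 = _
    have h1 : brLoopA (s0 :: rest) s0 0 0 s0 = brLoopA rest s0 0 0 s0 := by
      simp [brLoopA]
    rw [h1, brLoopA_eq_counts]
    simp [breakingRecords_alt]
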